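-- pv_equiv track=rewrite | github.com/varungor365/ai-email-checker | core/ai/self_learning_engine.py | _extract_password_pattern
-- ===== SOURCE A (Python) =====
-- def _extract_password_pattern(password: str) -> str:
--     """Extract pattern from password"""
--     pattern = []
--
--     if any(c.isupper() for c in password):
--         pattern.append('UPPER')
--     if any(c.islower() for c in password):
--         pattern.append('LOWER')
--     if any(c.isdigit() for c in password):
--         pattern.append('DIGIT')
--     if any(not c.isalnum() for c in password):
--         pattern.append('SPECIAL')
--
--     pattern.append(f'LEN_{len(password)//4*4}')  # Group by length ranges
--
--     return '_'.join(pattern)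
-- ===== SOURCE B (Python) =====
-- def _extract_password_pattern(password: str) -> str:
--     """Extract pattern from password (single pass over characters)."""
--     has_upper = has_lower = has_digit = has_special = False
--     for c in password:
--         if c.isupper():
--             has_upper = True
--         if c.islower():
--             has_lower = True
--         if c.isdigit():
--             has_digit = True
--         if not c.isalnum():
--             has_special = True
--     pattern = []
--     if has_upper:
--         pattern.append('UPPER')
--     if has_lower:
--         pattern.append('LOWER')
--     if has_digit:
--         pattern.append('DIGIT')
--     if has_special:
--         pattern.append('SPECIAL')
--     pattern.append(f'LEN_{len(password)//4*4}')
--     return '_'.join(pattern)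
-- ===== Notes on version B (the rewrite author's own statement) =====
-- stated objective: alternative
-- what changed: Replaces A's four independent short-circuiting any() scans of the password with a single pass that maintains four boolean flags and builds the label list from the flags afterwards.
import Mathlib
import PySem

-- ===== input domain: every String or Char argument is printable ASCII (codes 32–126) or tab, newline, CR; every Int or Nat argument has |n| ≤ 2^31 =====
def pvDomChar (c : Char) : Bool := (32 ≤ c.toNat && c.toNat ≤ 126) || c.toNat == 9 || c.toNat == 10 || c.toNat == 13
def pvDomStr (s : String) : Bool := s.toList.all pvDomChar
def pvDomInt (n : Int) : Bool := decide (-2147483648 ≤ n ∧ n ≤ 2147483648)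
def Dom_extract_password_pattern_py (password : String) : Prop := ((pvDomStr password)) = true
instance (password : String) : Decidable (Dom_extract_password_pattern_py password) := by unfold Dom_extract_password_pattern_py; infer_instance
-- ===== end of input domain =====

-- B replaces A's four independent any() scans with one pass maintaining four boolean flags (alternative decomposition, same cost).

-- ===== PORT A =====
-- literal transliteration: four any-scans appending labels, then the length bucket, then '_'.join
def extract_password_pattern_py (password : String) : String :=
  let cs := password.toList
  let pattern : List String := []
  let pattern := if cs.any (fun c => PySem.Chars.isupper c) then pattern ++ ["UPPER"] else pattern
  let pattern := if cs.any (fun c => PySem.Chars.islower c) then pattern ++ ["LOWER"] else pattern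
  let pattern := if cs.any (fun c => PySem.Chars.isdigit c) then pattern ++ ["DIGIT"] else pattern
  let pattern := if cs.any (fun c => !PySem.Chars.isalnum c) then pattern ++ ["SPECIAL"] else pattern
  let pattern := pattern ++ ["LEN_" ++ PySem.Int.toStr (PySem.Int.floordiv (PySem.Str.len password) 4 * 4)]
  PySem.Str.join "_" pattern

-- ===== PORT B =====
-- literal transliteration of Source B: one fold over the characters maintaining four flags, then build the list from the flags
def extract_password_pattern_py_alt (password : String) : String :=
  let flags := password.toList.foldl
    (fun (st : Bool × Bool × Bool × Bool) c =>
      (st.1 || PySem.Chars.isupper c,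
       st.2.1 || PySem.Chars.islower c,
       st.2.2.1 || PySem.Chars.isdigit c,
       st.2.2.2 || !PySem.Chars.isalnum c))
    (false, false, false, false)
  let pattern : List String :=
    (if flags.1 then ["UPPER"] else []) ++
    (if flags.2.1 then ["LOWER"] else []) ++
    (if flags.2.2.1 then ["DIGIT"] else []) ++
    (if flags.2.2.2 then ["SPECIAL"] else []) ++
    ["LEN_" ++ PySem.Int.toStr (PySem.Int.floordiv (PySem.Str.len password) 4 * 4)]
  PySem.Str.join "_" pattern

-- ===== PRECONDITION & SPEC =====
def Spec_extract_password_pattern_py (password : String) (out : String) : Prop := out = extract_password_pattern_py_alt password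
instance (password : String) (out : String) : Decidable (Spec_extract_password_pattern_py password out) := by unfold Spec_extract_password_pattern_py; infer_instance

-- ===== CLAIM (what is proved, stated in full; the proofs are below) =====
def Claim_equal_extract_password_pattern_py : Prop := ∀ (password : String), Dom_extract_password_pattern_py password → Spec_extract_password_pattern_py password (extract_password_pattern_py password)

-- ===== LEMMAS AND PROOFS =====

-- the flag fold computes exactly the four any-scans
theorem flags_eq (l : List Char) (a b c d : Bool) :
    l.foldl (fun (st : Bool × Bool × Bool × Bool) ch =>
      (st.1 || PySem.Chars.isupper ch,
       st.2.1 || PySem.Chars.islower ch,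
       st.2.2.1 || PySem.Chars.isdigit ch,
       st.2.2.2 || !PySem.Chars.isalnum ch)) (a, b, c, d)
    = (a || l.any (fun ch => PySem.Chars.isupper ch),
       b || l.any (fun ch => PySem.Chars.islower ch),
       c || l.any (fun ch => PySem.Chars.isdigit ch),
       d || l.any (fun ch => !PySem.Chars.isalnum ch)) := by
  induction l generalizing a b c d with
  | nil => simp
  | cons x xs ih => simp [List.foldl, ih, Bool.or_assoc]

-- ===== VERDICT (by name: the statement is the Claim_ definition above) =====
theorem extract_password_pattern_py_spec : Claim_equal_extract_password_pattern_py := by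
  intro password _
  show extract_password_pattern_py password = extract_password_pattern_py_alt password
  unfold extract_password_pattern_py extract_password_pattern_py_alt
  rw [flags_eq]
  simp only [Bool.false_or]
  by_cases h1 : password.toList.any (fun c => PySem.Chars.isupper c) <;>
  by_cases h2 : password.toList.any (fun c => PySem.Chars.islower c) <;>
  by_cases h3 : password.toList.any (fun c => PySem.Chars.isdigit c) <;>
  by_cases h4 : password.toList.any (fun c => !PySem.Chars.isalnum c) <;>
  simp [h1, h2, h3, h4]
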